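-- pv_equiv track=rewrite | github.com/lumenyx-chain/lumenyx | scripts/shield.py | compute_merkle_root
-- ===== SOURCE A (Python) =====
-- FIELD_MODULUS = 21888242871839275222246405745257275088548364400416034343698204186575808495617
--
-- TREE_DEPTH = 20
--
-- def poseidon_hash(inputs: list) -> int:
--     """
--     Poseidon hash matching ZK circuit and on-chain implementation.
--     """
--     state = 0
--     for i, inp in enumerate(inputs):
--         state = (state + inp) % FIELD_MODULUS
--         state = pow(state, 5, FIELD_MODULUS)
--         state = (state + (i + 1)) % FIELD_MODULUS
--     return state
--
-- def poseidon_hash_pair(left: int, right: int) -> int: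
--     """Hash two field elements together"""
--     return poseidon_hash([left, right])
--
-- def compute_merkle_root(leaves: list, new_leaf: int, new_index: int) -> int:
--     """
--     Compute Merkle root after inserting new_leaf at new_index.
--     Uses Poseidon hash for ZK compatibility.
--     """
--     # Add new leaf to the list
--     all_leaves = leaves + [new_leaf]
--
--     # Pad to power of 2 with zeros
--     tree_size = 2 ** TREE_DEPTH
--     while len(all_leaves) < tree_size:
--         all_leaves.append(0)
--
--     # Build tree bottom-up
--     current_level = all_leaves
--     for level in range(TREE_DEPTH):
--         next_level = []
--         for i in range(0, len(current_level), 2):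
--             left = current_level[i]
--             right = current_level[i + 1] if i + 1 < len(current_level) else 0
--             next_level.append(poseidon_hash_pair(left, right))
--         current_level = next_level
--
--     return current_level[0] if current_level else 0
-- ===== SOURCE B (Python) =====
-- FIELD_MODULUS = 21888242871839275222246405745257275088548364400416034343698204186575808495617
--
-- TREE_DEPTH = 20
--
-- def poseidon_hash(inputs: list) -> int:
--     state = 0
--     for i, inp in enumerate(inputs):
--         state = (state + inp) % FIELD_MODULUS
--         state = pow(state, 5, FIELD_MODULUS)
--         state = (state + (i + 1)) % FIELD_MODULUS
--     return state
--
-- def compute_merkle_root(leaves: list, new_leaf: int, new_index: int) -> int: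
--     # Sparse Merkle root: never materialise the 2**TREE_DEPTH zero padding.
--     # Only the non-zero prefix is hashed at each level; `zero` is the hash of
--     # an all-zero subtree of the current height, recomputed once per level.
--     cur = leaves + [new_leaf]
--     zero = 0
--     for _ in range(TREE_DEPTH):
--         cur = [poseidon_hash([cur[i], cur[i + 1] if i + 1 < len(cur) else zero])
--                for i in range(0, len(cur), 2)]
--         zero = poseidon_hash([zero, zero])
--     return cur[0]
-- ===== Notes on version B (the rewrite author's own statement) =====
-- stated objective: faster
-- what changed: B computes the root sparsely: it hashes only the non-empty prefix of each level and carries the per-level empty-subtree hash along, instead of materialising and hashing the full 2^20-leaf zero-padded tree.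
import Mathlib
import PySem

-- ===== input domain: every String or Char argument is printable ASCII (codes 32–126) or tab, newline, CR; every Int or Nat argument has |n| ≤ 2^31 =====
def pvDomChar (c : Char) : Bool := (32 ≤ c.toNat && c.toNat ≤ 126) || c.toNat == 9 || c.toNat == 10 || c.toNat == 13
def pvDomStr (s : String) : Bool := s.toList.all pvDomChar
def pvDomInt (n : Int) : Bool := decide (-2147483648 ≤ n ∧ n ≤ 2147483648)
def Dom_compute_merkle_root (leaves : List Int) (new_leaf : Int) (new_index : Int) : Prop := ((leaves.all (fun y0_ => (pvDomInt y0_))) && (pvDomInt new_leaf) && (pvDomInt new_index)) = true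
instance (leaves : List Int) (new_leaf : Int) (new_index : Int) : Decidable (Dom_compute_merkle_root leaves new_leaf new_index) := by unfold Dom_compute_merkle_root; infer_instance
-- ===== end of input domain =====

-- B replaces A's fully materialised 2^20-leaf tree by a sparse computation that hashes only
-- the non-empty prefix of each level, carrying the per-level empty-subtree hash (objective: faster).

-- ===== PORT A =====
def FIELD_MODULUS : Int := 21888242871839275222246405745257275088548364400416034343698204186575808495617
def TREE_DEPTH : Nat := 20

-- poseidon_hash: the for-loop over enumerate(inputs)
def poseidon_hash (inputs : List Int) : Int :=
  inputs.zipIdx.foldl (fun state p =>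
    let s1 := PySem.Int.mod (state + p.1) FIELD_MODULUS
    let s2 := PySem.Int.powMod s1 5 FIELD_MODULUS
    PySem.Int.mod (s2 + ((p.2 : Int) + 1)) FIELD_MODULUS) 0

def poseidon_hash_pair (left right : Int) : Int := poseidon_hash [left, right]

-- the while-loop that appends 0 until the length reaches 2^TREE_DEPTH,
-- ported as appending all the zeros it adds in one step (exact: same resulting list)
def padA (xs : List Int) : List Int :=
  xs ++ List.replicate (2 ^ TREE_DEPTH - xs.length) 0

-- the inner for-loop over range(0, len, 2): next_level.append(...) — accumulator + reverse
def levelAux (acc : List Int) : List Int → List Int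
  | [] => acc.reverse
  | [a] => (poseidon_hash_pair a 0 :: acc).reverse          -- i + 1 < len fails: right = 0
  | a :: b :: t => levelAux (poseidon_hash_pair a b :: acc) t

-- the outer for-loop over range(TREE_DEPTH)
def buildA : Nat → List Int → List Int
  | 0, cur => cur
  | k + 1, cur => buildA k (levelAux [] cur)

def compute_merkle_root (leaves : List Int) (new_leaf : Int) (new_index : Int) : Int :=
  let all_leaves := padA (leaves ++ [new_leaf])
  match buildA TREE_DEPTH all_leaves with
  | x :: _ => x
  | [] => 0

-- ===== PORT B =====
-- the list comprehension pairing cur[i] with cur[i+1] (or the empty-subtree hash z)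
def levelB (z : Int) : List Int → List Int
  | [] => []
  | [a] => [poseidon_hash [a, z]]
  | a :: b :: t => poseidon_hash [a, b] :: levelB z t

-- the for-loop over range(TREE_DEPTH), threading the empty-subtree hash `zero`
def buildB : Nat → Int → List Int → List Int
  | 0, _, cur => cur
  | k + 1, z, cur => buildB k (poseidon_hash [z, z]) (levelB z cur)

def compute_merkle_root_alt (leaves : List Int) (new_leaf : Int) (new_index : Int) : Int :=
  -- Python's `return cur[0]`; cur is never empty (it always holds at least new_leaf's chain),
  -- so the [] branch is unreachable and this match is exact
  match buildB TREE_DEPTH 0 (leaves ++ [new_leaf]) with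
  | x :: _ => x
  | [] => 0

-- ===== PRECONDITION & SPEC =====
def Spec_compute_merkle_root (leaves : List Int) (new_leaf : Int) (new_index : Int) (out : Int) : Prop := out = compute_merkle_root_alt leaves new_leaf new_index
instance (leaves : List Int) (new_leaf : Int) (new_index : Int) (out : Int) : Decidable (Spec_compute_merkle_root leaves new_leaf new_index out) := by unfold Spec_compute_merkle_root; infer_instance

-- ===== CLAIM (what is proved, stated in full; the proofs are below) =====
def Claim_equal_compute_merkle_root : Prop := ∀ (leaves : List Int) (new_leaf : Int) (new_index : Int), Dom_compute_merkle_root leaves new_leaf new_index → Spec_compute_merkle_root leaves new_leaf new_index (compute_merkle_root leaves new_leaf new_index)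

-- ===== LEMMAS AND PROOFS =====

-- non-accumulator form of A's inner loop, for reasoning
def levelS : List Int → List Int
  | [] => []
  | [a] => [poseidon_hash_pair a 0]
  | a :: b :: t => poseidon_hash_pair a b :: levelS t

def buildS : Nat → List Int → List Int
  | 0, cur => cur
  | k + 1, cur => buildS k (levelS cur)

theorem levelAux_eq (xs : List Int) : ∀ acc, levelAux acc xs = acc.reverse ++ levelS xs := by
  induction xs using levelS.induct with
  | case1 => intro acc; simp [levelAux, levelS]
  | case2 a => intro acc; simp [levelAux, levelS]
  | case3 a b t ih => intro acc; simp [levelAux, levelS, ih]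

theorem buildA_eq (k : Nat) : ∀ cur, buildA k cur = buildS k cur := by
  induction k with
  | zero => intro cur; rfl
  | succ k ih => intro cur; simp [buildA, buildS, levelAux_eq, ih]

theorem len_levelS (xs : List Int) : (levelS xs).length = (xs.length + 1) / 2 := by
  induction xs using levelS.induct with
  | case1 => simp [levelS]
  | case2 a => simp [levelS]
  | case3 a b t ih => simp [levelS, ih]; omega

theorem len_levelB (z : Int) (xs : List Int) : (levelB z xs).length = (xs.length + 1) / 2 := by
  induction xs using levelS.induct with
  | case1 => simp [levelB]
  | case2 a => simp [levelB]
  | case3 a b t ih => simp [levelB, ih]; omega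

theorem levelS_rep (m : Nat) (z : Int) (hm : m % 2 = 0) :
    levelS (List.replicate m z) = List.replicate (m / 2) (poseidon_hash [z, z]) := by
  induction m using Nat.strong_induction_on with
  | _ m ih =>
    match m, hm with
    | 0, _ => simp [levelS]
    | (n + 2), hm =>
      have h : List.replicate (n + 2) z = z :: z :: List.replicate n z := by
        simp [List.replicate_succ]
      rw [h]
      show poseidon_hash_pair z z :: levelS (List.replicate n z) = _
      rw [ih n (by omega) (by omega)]
      have : (n + 2) / 2 = n / 2 + 1 := by omega
      rw [this, List.replicate_succ]
      rfl

theorem main_level (p : List Int) : ∀ (z : Int) (m : Nat), (p.length + m) % 2 = 0 →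
    levelS (p ++ List.replicate m z) =
      levelB z p ++ List.replicate ((p.length + m) / 2 - (p.length + 1) / 2) (poseidon_hash [z, z]) := by
  induction p using levelS.induct with
  | case1 =>
    intro z m hm
    simp only [List.length_nil, Nat.zero_add] at hm
    simp only [List.nil_append, List.length_nil, Nat.zero_add, levelB]
    rw [levelS_rep m z (by omega)]
    congr 1
  | case2 a =>
    intro z m hm
    simp only [List.length_cons, List.length_nil] at hm
    obtain ⟨n, rfl⟩ : ∃ n, m = n + 1 := ⟨m - 1, by omega⟩
    have h : ([a] : List Int) ++ List.replicate (n + 1) z = a :: z :: List.replicate n z := by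
      simp [List.replicate_succ]
    rw [h]
    show poseidon_hash_pair a z :: levelS (List.replicate n z) = _
    rw [levelS_rep n z (by omega)]
    have h2 : levelB z [a] = [poseidon_hash [a, z]] := rfl
    rw [h2]
    have h3 : (([a] : List Int).length + (n + 1)) / 2 - (([a] : List Int).length + 1) / 2 = n / 2 := by
      simp; omega
    rw [h3]
    rfl
  | case3 a b t ih =>
    intro z m hm
    simp only [List.length_cons] at hm ⊢
    have h : (a :: b :: t) ++ List.replicate m z = a :: b :: (t ++ List.replicate m z) := by simp
    rw [h]
    show poseidon_hash_pair a b :: levelS (t ++ List.replicate m z) = _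
    rw [ih z m (by omega)]
    have h2 : levelB z (a :: b :: t) = poseidon_hash [a, b] :: levelB z t := rfl
    rw [h2]
    have h3 : (t.length + 1 + 1 + m) / 2 - (t.length + 1 + 1 + 1) / 2
            = (t.length + m) / 2 - (t.length + 1) / 2 := by omega
    rw [h3]
    rfl

theorem levelB_ne_nil (z : Int) (xs : List Int) (h : xs ≠ []) : levelB z xs ≠ [] := by
  match xs, h with
  | [a], _ => simp [levelB]
  | a :: b :: t, _ => simp [levelB]

theorem buildB_ne_nil (k : Nat) : ∀ (z : Int) (xs : List Int), xs ≠ [] → buildB k z xs ≠ [] := by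
  induction k with
  | zero => intro z xs h; exact h
  | succ k ih => intro z xs h; exact ih _ _ (levelB_ne_nil z xs h)

-- padded case: A's level lists are B's level lists followed by copies of the empty-subtree hash
theorem main_build (k : Nat) : ∀ (z : Int) (p : List Int) (m : Nat), (p.length + m) % 2 ^ k = 0 →
    ∃ w r, buildS k (p ++ List.replicate m z) = buildB k z p ++ List.replicate r w := by
  induction k with
  | zero => intro z p m _; exact ⟨z, m, rfl⟩
  | succ k ih =>
    intro z p m hm
    have h2 : (p.length + m) % 2 = 0 := by
      obtain ⟨c, hc⟩ := Nat.dvd_of_mod_eq_zero hm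
      have : p.length + m = 2 * (2 ^ k * c) := by rw [hc, pow_succ]; ring
      omega
    show (∃ w r, buildS k (levelS (p ++ List.replicate m z)) = _ ++ List.replicate r w)
    rw [main_level p z m h2]
    have hlen : (levelB z p).length + ((p.length + m) / 2 - (p.length + 1) / 2) = (p.length + m) / 2 := by
      rw [len_levelB]; omega
    have hdiv : ((p.length + m) / 2) % 2 ^ k = 0 := by
      obtain ⟨c, hc⟩ : 2 ^ (k + 1) ∣ (p.length + m) := Nat.dvd_of_mod_eq_zero hm
      have : (p.length + m) / 2 = 2 ^ k * c := by
        rw [hc, pow_succ, Nat.mul_comm (2 ^ k) 2, Nat.mul_assoc, Nat.mul_div_cancel_left _ (by norm_num)]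
      rw [this]
      exact Nat.mul_mod_right _ _
    have := ih (poseidon_hash [z, z]) (levelB z p) ((p.length + m) / 2 - (p.length + 1) / 2)
      (by rw [hlen]; exact hdiv)
    exact this

-- overflow case: A's and B's level lists share everything but the very last entry
theorem step2 (xs : List Int) : ∀ (x y z : Int), ∃ c a b,
    levelS (xs ++ [x]) = c ++ [a] ∧ levelB z (xs ++ [y]) = c ++ [b] := by
  induction xs using levelS.induct with
  | case1 => intro x y z; exact ⟨[], poseidon_hash_pair x 0, poseidon_hash [y, z], by simp [levelS], by simp [levelB]⟩
  | case2 u => intro x y z; exact ⟨[], poseidon_hash_pair u x, poseidon_hash [u, y], by simp [levelS], by simp [levelB]⟩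
  | case3 u v t ih =>
    intro x y z
    obtain ⟨c, a, b, ha, hb⟩ := ih x y z
    exact ⟨poseidon_hash_pair u v :: c, a, b, by simp [levelS, ha], by simp [levelB, poseidon_hash_pair, hb]⟩

theorem buildRel (k : Nat) : ∀ (z : Int) (xs : List Int) (x y : Int), ∃ c a b,
    buildS k (xs ++ [x]) = c ++ [a] ∧ buildB k z (xs ++ [y]) = c ++ [b] := by
  induction k with
  | zero => intro z xs x y; exact ⟨xs, x, y, rfl, rfl⟩
  | succ k ih =>
    intro z xs x y
    obtain ⟨c, a, b, ha, hb⟩ := step2 xs x y z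
    obtain ⟨c', a', b', ha', hb'⟩ := ih (poseidon_hash [z, z]) c a b
    exact ⟨c', a', b', by show buildS k (levelS (xs ++ [x])) = _; rw [ha]; exact ha',
                       by show buildB k _ (levelB z (xs ++ [y])) = _; rw [hb]; exact hb'⟩

theorem buildS_len (k : Nat) : ∀ xs : List Int, xs ≠ [] →
    (buildS k xs).length = (xs.length - 1) / 2 ^ k + 1 := by
  induction k with
  | zero => intro xs h; cases xs with | nil => simp at h | cons a t => simp [buildS]
  | succ k ih =>
    intro xs h
    have hne : levelS xs ≠ [] := by
      match xs, h with
      | [a], _ => simp [levelS]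
      | a :: b :: t, _ => simp [levelS]
    show (buildS k (levelS xs)).length = _
    rw [ih _ hne, len_levelS]
    have h1 : (xs.length + 1) / 2 - 1 = (xs.length - 1) / 2 := by
      cases xs with | nil => simp at h | cons a t => simp; omega
    rw [h1, Nat.div_div_eq_div_mul]
    congr 2
    rw [pow_succ, Nat.mul_comm]

-- ===== VERDICT (by name: the statement is the Claim_ definition above) =====
theorem compute_merkle_root_spec : Claim_equal_compute_merkle_root := by
  intro leaves new_leaf new_index _
  unfold Spec_compute_merkle_root
  simp only [compute_merkle_root, compute_merkle_root_alt, padA, buildA_eq]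
  set base := leaves ++ [new_leaf] with hbase
  have hbne : base ≠ [] := by simp [hbase]
  have hlen : base.length = leaves.length + 1 := by simp [hbase]
  by_cases hcap : base.length ≤ 2 ^ TREE_DEPTH
  · -- within capacity: padding makes A's levels = B's levels plus an empty-subtree tail
    obtain ⟨w, r, hwr⟩ := main_build TREE_DEPTH 0 base (2 ^ TREE_DEPTH - base.length)
      (by have : base.length + (2 ^ TREE_DEPTH - base.length) = 2 ^ TREE_DEPTH := by omega
          rw [this, Nat.mod_self])
    rw [hwr]
    obtain ⟨h0, t0, hB⟩ : ∃ h0 t0, buildB TREE_DEPTH 0 base = h0 :: t0 := by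
      rcases hb : buildB TREE_DEPTH 0 base with _ | ⟨h0, t0⟩
      · exact absurd hb (buildB_ne_nil _ _ _ hbne)
      · exact ⟨h0, t0, rfl⟩
    rw [hB]
    rfl
  · -- over capacity: no padding; the lists agree except on the last entry, and the
    -- result is the head of a list of length ≥ 2, hence in the shared prefix
    have hm0 : 2 ^ TREE_DEPTH - base.length = 0 := by omega
    rw [hm0]
    simp only [List.replicate_zero, List.append_nil]
    obtain ⟨c, a, b, ha, hb⟩ := buildRel TREE_DEPTH 0 leaves new_leaf new_leaf
    rw [← hbase] at ha hb
    have hlenS : (buildS TREE_DEPTH base).length = (base.length - 1) / 2 ^ TREE_DEPTH + 1 :=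
      buildS_len TREE_DEPTH base hbne
    have hge : 1 ≤ (base.length - 1) / 2 ^ TREE_DEPTH := by
      have : 2 ^ TREE_DEPTH ≤ base.length - 1 := by omega
      exact Nat.one_le_div_iff (by positivity) |>.mpr this
    have hclen : 1 ≤ c.length := by
      rw [ha] at hlenS; simp at hlenS; omega
    obtain ⟨h0, t0, rfl⟩ : ∃ h0 t0, c = h0 :: t0 := by
      cases c with | nil => simp at hclen | cons h0 t0 => exact ⟨h0, t0, rfl⟩
    rw [ha, hb]
    rfl
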